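-- pv_equiv track=rewrite | github.com/yakkalaanugna/Iterative-RAG-project | run_all_experiments.py | extract_retrieved_files
-- ===== SOURCE A (Python) =====
-- def extract_retrieved_files(result, relevant_files):
--     """Extract file names from retrieved documents for metric computation."""
--     retrieved = []
--     for log_text in result.get("supporting_logs", []):
--         matched = False
--         for rel_file in relevant_files:
--             if rel_file.lower() in log_text.lower():
--                 retrieved.append(rel_file)
--                 matched = True
--                 break
--         if not matched:
--             retrieved.append(f"__irrelevant_{len(retrieved)}")
--     return retrieved
-- ===== SOURCE B (Python) =====
-- def extract_retrieved_files(result, relevant_files):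
--     # Inverted traversal: one slot per log, filled by scanning the files in
--     # priority order over all slots, then a final labeling pass.
--     slots = [(None, log.lower()) for log in result.get("supporting_logs", [])]
--     for rel_file in relevant_files:
--         pat = rel_file.lower()
--         slots = [(m if m is not None or pat not in log else rel_file, log)
--                  for m, log in slots]
--     out = []
--     for m, _ in slots:
--         out.append(m if m is not None else f"__irrelevant_{len(out)}")
--     return out
-- ===== Notes on version B (the rewrite author's own statement) =====
-- stated objective: alternative
-- what changed: Inverts the loop nesting: instead of scanning the file list per log with a break and a matched flag, B keeps one slot per log and sweeps the relevant files in priority order over all slots, filling each still-empty slot on first match, then a final pass turns empty slots into __irrelevant_<index> labels.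
import Mathlib
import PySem

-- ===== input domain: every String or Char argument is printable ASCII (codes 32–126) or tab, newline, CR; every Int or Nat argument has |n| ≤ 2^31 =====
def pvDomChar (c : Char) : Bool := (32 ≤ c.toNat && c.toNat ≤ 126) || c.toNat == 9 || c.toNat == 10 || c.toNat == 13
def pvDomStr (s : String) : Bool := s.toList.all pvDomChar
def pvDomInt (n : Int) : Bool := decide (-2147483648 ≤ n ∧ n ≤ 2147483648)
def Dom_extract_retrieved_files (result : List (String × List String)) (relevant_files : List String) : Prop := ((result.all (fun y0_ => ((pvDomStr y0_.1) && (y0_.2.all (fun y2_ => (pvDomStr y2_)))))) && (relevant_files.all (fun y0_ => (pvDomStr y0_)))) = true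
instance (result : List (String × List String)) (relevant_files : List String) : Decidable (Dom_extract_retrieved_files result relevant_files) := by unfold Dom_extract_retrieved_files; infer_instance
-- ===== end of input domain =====

-- B inverts the loop nesting: one slot per log, a sweep over the relevant files in priority
-- order fills each empty slot on first match, then a final pass labels empty slots (objective: alternative).

-- ===== PORT A =====
-- inner 'for rel_file … break' loop: first relevant file whose lowercase is a substring
def extractInnerA (log_text : String) : List String → Option String
  | [] => none
  | f :: rest =>
      if PySem.Str.isIn (PySem.Str.lower f) (PySem.Str.lower log_text) then some f
      else extractInnerA log_text rest

def extract_retrieved_files (result : List (String × List String)) (relevant_files : List String) : List String :=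
  (PySem.Dict.getD (PySem.Dict.mk result) "supporting_logs" []).foldl
    (fun retrieved log_text =>
      match extractInnerA log_text relevant_files with
      | some f => retrieved ++ [f]
      | none => retrieved ++ ["__irrelevant_" ++ PySem.Int.toStr (retrieved.length : Int)])
    []

-- ===== PORT B =====
-- the per-slot conditional of B's comprehension: fill a still-empty slot on first match
def slotStep (rel_file : String) (p : Option String × String) : Option String × String :=
  if p.1.isSome || !(PySem.Str.isIn (PySem.Str.lower rel_file) p.2) then p
  else (some rel_file, p.2)

def extract_retrieved_files_alt (result : List (String × List String)) (relevant_files : List String) : List String :=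
  (relevant_files.foldl
      (fun slots rel_file => slots.map (slotStep rel_file))
      ((PySem.Dict.getD (PySem.Dict.mk result) "supporting_logs" []).map
        (fun log => ((none : Option String), PySem.Str.lower log)))).foldl
    (fun out p =>
      out ++ [p.1.getD ("__irrelevant_" ++ PySem.Int.toStr (out.length : Int))])
    []

-- ===== PRECONDITION & SPEC =====
def Spec_extract_retrieved_files (result : List (String × List String)) (relevant_files : List String) (out : List String) : Prop := out = extract_retrieved_files_alt result relevant_files
instance (result : List (String × List String)) (relevant_files : List String) (out : List String) : Decidable (Spec_extract_retrieved_files result relevant_files out) := by unfold Spec_extract_retrieved_files; infer_instance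

-- ===== CLAIM (what is proved, stated in full; the proofs are below) =====
def Claim_equal_extract_retrieved_files : Prop := ∀ (result : List (String × List String)) (relevant_files : List String), Dom_extract_retrieved_files result relevant_files → Spec_extract_retrieved_files result relevant_files (extract_retrieved_files result relevant_files)

-- ===== LEMMAS AND PROOFS =====

-- B's sweep over the files acts independently on each slot
theorem sweep_eq_map (fs : List String) (slots : List (Option String × String)) :
    fs.foldl (fun slots rel_file => slots.map (slotStep rel_file)) slots =
      slots.map (fun p => fs.foldl (fun p rel_file => slotStep rel_file p) p) := by
  induction fs generalizing slots with
  | nil => simp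
  | cons f rest ih => simp [ih, List.map_map, Function.comp_def]

-- a filled slot is never overwritten
theorem perSlot_some (fs : List String) (x : String) (ll : String) :
    fs.foldl (fun p rel_file => slotStep rel_file p) (some x, ll) = (some x, ll) := by
  induction fs with
  | nil => rfl
  | cons f rest ih => simpa [slotStep] using ih

-- the per-slot fold computes A's inner break-loop
theorem perSlot_eq_innerA (fs : List String) (log : String) :
    fs.foldl (fun p rel_file => slotStep rel_file p) (none, PySem.Str.lower log) =
      (extractInnerA log fs, PySem.Str.lower log) := by
  induction fs with
  | nil => rfl
  | cons f rest ih =>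
      rw [List.foldl_cons]
      cases h : PySem.Str.isIn (PySem.Str.lower f) (PySem.Str.lower log) with
      | true =>
          have h' := h
          simp only [PySem.Str.isIn_eq, PySem.Str.toList_lower] at h'
          have hs : slotStep f ((none : Option String), PySem.Str.lower log)
              = (some f, PySem.Str.lower log) := by simp [slotStep, h']
          rw [hs, perSlot_some]
          simp [extractInnerA, h, h']
      | false =>
          have h' := h
          simp only [PySem.Str.isIn_eq, PySem.Str.toList_lower] at h'
          have hs : slotStep f ((none : Option String), PySem.Str.lower log)
              = ((none : Option String), PySem.Str.lower log) := by simp [slotStep, h']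
          rw [hs, ih]
          simp [extractInnerA, h, h']

-- enumerate over a mapped list
theorem enumerate_map {α β : Type} (g : α → β) (xs : List α) (s : Int) :
    PySem.List.enumerate (xs.map g) s =
      (PySem.List.enumerate xs s).map (fun p => (p.1, g p.2)) := by
  induction xs generalizing s with
  | nil => simp [PySem.List.enumerate_nil]
  | cons x rest ih => simp [PySem.List.enumerate_cons, ih]

-- A's outer fold, as a map over enumerate
theorem foldA_eq (fs : List String) (logs : List String) (acc : List String) :
    logs.foldl
      (fun retrieved log_text =>
        match extractInnerA log_text fs with
        | some f => retrieved ++ [f]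
        | none => retrieved ++ ["__irrelevant_" ++ PySem.Int.toStr (retrieved.length : Int)])
      acc =
    acc ++ (PySem.List.enumerate logs (acc.length : Int)).map
      (fun p => (extractInnerA p.2 fs).getD ("__irrelevant_" ++ PySem.Int.toStr p.1)) := by
  induction logs generalizing acc with
  | nil => simp [PySem.List.enumerate_nil]
  | cons log rest ih =>
      simp only [List.foldl_cons, PySem.List.enumerate_cons, List.map_cons]
      cases hf : extractInnerA log fs with
      | some f => rw [ih]; simp
      | none => rw [ih]; simp [List.append_assoc, Nat.cast_add]

-- B's final labeling pass, as a map over enumerate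
theorem foldB_eq (slots : List (Option String × String)) (acc : List String) :
    slots.foldl
      (fun out p =>
        out ++ [p.1.getD ("__irrelevant_" ++ PySem.Int.toStr (out.length : Int))])
      acc =
    acc ++ (PySem.List.enumerate slots (acc.length : Int)).map
      (fun q => q.2.1.getD ("__irrelevant_" ++ PySem.Int.toStr q.1)) := by
  induction slots generalizing acc with
  | nil => simp [PySem.List.enumerate_nil]
  | cons p rest ih =>
      simp only [List.foldl_cons, PySem.List.enumerate_cons, List.map_cons]
      cases hp : p.1 with
      | some f => rw [ih]; simp [hp]
      | none => rw [ih]; simp [hp, List.append_assoc, Nat.cast_add]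

-- ===== VERDICT (by name: the statement is the Claim_ definition above) =====
theorem extract_retrieved_files_spec : Claim_equal_extract_retrieved_files := by
  intro result relevant_files _
  unfold Spec_extract_retrieved_files extract_retrieved_files extract_retrieved_files_alt
  rw [foldA_eq, sweep_eq_map, foldB_eq]
  simp [enumerate_map, List.map_map, Function.comp_def, perSlot_eq_innerA]
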